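-- pv_equiv track=rewrite | github.com/JIAQIA/whosellm | llmeta/models/base.py | infer_variant_priority
-- ===== SOURCE A (Python) =====
-- def infer_variant_priority(variant: str) -> tuple[int, ...]:
--     """
--     根据型号名称推断优先级 / Infer priority from variant name
--
--     通用规则: mini < flash < base < turbo < plus < pro < ultra < omni
--     General rule: mini < flash < base < turbo < plus < pro < ultra < omni
--
--     Args:
--         variant: 型号名称 / Variant name
--
--     Returns:
--         tuple: 优先级元组 / Priority tuple
--     """
--     # 定义型号优先级映射 / Define variant priority mapping
--     priority_map = {
--         "mini": 0,
--         "flash": 0,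
--         "base": 1,
--         "turbo": 2,
--         "plus": 3,
--         "pro": 4,
--         "ultra": 5,
--         "omni": 6,
--         "preview": 0,  # preview 通常是早期版本 / preview is usually an early version
--     }
--
--     # 如果型号包含多个关键词，取最高优先级 / If variant contains multiple keywords, take highest priority
--     variant_lower = variant.lower()
--     found_priority = None
--
--     for keyword, priority in priority_map.items():
--         if keyword in variant_lower:
--             found_priority = priority if found_priority is None else max(found_priority, priority)
--
--     # 如果没有找到匹配的关键词，返回默认优先级 1 (base)
--     # If no matching keyword found, return default priority 1 (base)
--     return (found_priority if found_priority is not None else 1,)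
-- ===== SOURCE B (Python) =====
-- _ORDERED = [("omni", 6), ("ultra", 5), ("pro", 4), ("plus", 3), ("turbo", 2),
--             ("base", 1), ("mini", 0), ("flash", 0), ("preview", 0)]
--
--
-- def infer_variant_priority(variant: str) -> tuple[int, ...]:
--     vl = variant.lower()
--     for keyword, priority in _ORDERED:
--         if keyword in vl:
--             return (priority,)
--     return (1,)
-- ===== Notes on version B (the rewrite author's own statement) =====
-- stated objective: alternative
-- what changed: Replaced A's full scan over the keyword map with a running-max Optional accumulator by a single scan over the keywords pre-sorted by priority descending that returns at the first substring hit.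
import Mathlib
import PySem

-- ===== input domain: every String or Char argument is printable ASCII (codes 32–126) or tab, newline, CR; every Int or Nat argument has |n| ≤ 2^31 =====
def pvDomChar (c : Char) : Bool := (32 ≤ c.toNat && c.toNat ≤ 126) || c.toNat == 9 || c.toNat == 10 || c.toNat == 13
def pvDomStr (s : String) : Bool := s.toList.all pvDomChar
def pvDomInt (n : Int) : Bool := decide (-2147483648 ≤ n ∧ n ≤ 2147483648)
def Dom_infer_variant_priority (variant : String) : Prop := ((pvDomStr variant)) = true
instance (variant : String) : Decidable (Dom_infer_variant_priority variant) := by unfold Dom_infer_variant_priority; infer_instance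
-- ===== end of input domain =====

-- B replaces A's full scan with running max by a priority-descending scan with early exit (objective: alternative).

-- ===== PORT A =====
-- priority_map in insertion order
def pvMapA : List (String × Int) :=
  [("mini", 0), ("flash", 0), ("base", 1), ("turbo", 2), ("plus", 3),
   ("pro", 4), ("ultra", 5), ("omni", 6), ("preview", 0)]

def infer_variant_priority (variant : String) : List Int :=
  let variant_lower := PySem.Str.lower variant
  let found_priority :=
    pvMapA.foldl (fun (acc : Option Int) kp =>
      if PySem.Str.isIn kp.1 variant_lower then
        match acc with
        | none => some kp.2
        | some p => some (max p kp.2)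
      else acc) none
  [match found_priority with | none => 1 | some p => p]

-- ===== PORT B =====
-- keywords sorted by priority descending
def pvOrderedB : List (String × Int) :=
  [("omni", 6), ("ultra", 5), ("pro", 4), ("plus", 3), ("turbo", 2),
   ("base", 1), ("mini", 0), ("flash", 0), ("preview", 0)]

def pvScanB (vl : String) : List (String × Int) → List Int
  | [] => [1]
  | (k, p) :: rest => if PySem.Str.isIn k vl then [p] else pvScanB vl rest

def infer_variant_priority_alt (variant : String) : List Int :=
  pvScanB (PySem.Str.lower variant) pvOrderedB

-- ===== PRECONDITION & SPEC =====
def Spec_infer_variant_priority (variant : String) (out : List Int) : Prop := out = infer_variant_priority_alt variant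
instance (variant : String) (out : List Int) : Decidable (Spec_infer_variant_priority variant out) := by unfold Spec_infer_variant_priority; infer_instance

-- ===== CLAIM (what is proved, stated in full; the proofs are below) =====
def Claim_equal_infer_variant_priority : Prop := ∀ (variant : String), Dom_infer_variant_priority variant → Spec_infer_variant_priority variant (infer_variant_priority variant)

-- ===== LEMMAS AND PROOFS =====

-- A's max-fold and B's first-hit scan agree, as pure functions of the nine containment booleans.
theorem pv_bool_cases (m f b t pl pr u o pv : Bool) :
    ([(let acc0 : Option Int := none
       let acc1 := if m then (match acc0 with | none => some 0 | some p => some (max p 0)) else acc0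
       let acc2 := if f then (match acc1 with | none => some 0 | some p => some (max p 0)) else acc1
       let acc3 := if b then (match acc2 with | none => some 1 | some p => some (max p 1)) else acc2
       let acc4 := if t then (match acc3 with | none => some 2 | some p => some (max p 2)) else acc3
       let acc5 := if pl then (match acc4 with | none => some 3 | some p => some (max p 3)) else acc4
       let acc6 := if pr then (match acc5 with | none => some 4 | some p => some (max p 4)) else acc5
       let acc7 := if u then (match acc6 with | none => some 5 | some p => some (max p 5)) else acc6
       let acc8 := if o then (match acc7 with | none => some 6 | some p => some (max p 6)) else acc7
       let acc9 := if pv then (match acc8 with | none => some 0 | some p => some (max p 0)) else acc8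
       match acc9 with | none => (1 : Int) | some p => p)] : List Int)
    = (if o then [(6 : Int)] else if u then [5] else if pr then [4] else if pl then [3]
       else if t then [2] else if b then [1] else if m then [0] else if f then [0]
       else if pv then [0] else [1]) := by
  cases m <;> cases f <;> cases b <;> cases t <;> cases pl <;> cases pr <;> cases u <;> cases o <;> cases pv <;> decide

theorem pv_eq (variant : String) :
    infer_variant_priority variant = infer_variant_priority_alt variant := by
  have h := pv_bool_cases
    (PySem.Str.isIn "mini" (PySem.Str.lower variant))
    (PySem.Str.isIn "flash" (PySem.Str.lower variant))
    (PySem.Str.isIn "base" (PySem.Str.lower variant))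
    (PySem.Str.isIn "turbo" (PySem.Str.lower variant))
    (PySem.Str.isIn "plus" (PySem.Str.lower variant))
    (PySem.Str.isIn "pro" (PySem.Str.lower variant))
    (PySem.Str.isIn "ultra" (PySem.Str.lower variant))
    (PySem.Str.isIn "omni" (PySem.Str.lower variant))
    (PySem.Str.isIn "preview" (PySem.Str.lower variant))
  simpa [infer_variant_priority, infer_variant_priority_alt, pvMapA, pvOrderedB,
         pvScanB, List.foldl] using h

-- ===== VERDICT (by name: the statement is the Claim_ definition above) =====
theorem infer_variant_priority_spec : Claim_equal_infer_variant_priority := by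
  intro variant _
  unfold Spec_infer_variant_priority
  exact pv_eq variant
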